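-- pv_equiv track=rewrite | github.com/syncable-dev/syncable-infra-gen-localAI | src/embedder.py | get_chunk_line_numbers
-- ===== SOURCE A (Python) =====
-- def get_line_offsets(text):
--     """Return a list of character offsets for the start of each line in text."""
--     offsets = [0]
--     for idx, char in enumerate(text):
--         if char == '\n':
--             offsets.append(idx + 1)
--     return offsets
--
-- def get_chunk_line_numbers(chunk_text, file_text, start_search=0):
--     """Return (start_line, end_line) for chunk_text within file_text."""
--     # Find the chunk in the file
--     idx = file_text.find(chunk_text, start_search)
--     if idx == -1:
--         return -1, -1
--     line_offsets = get_line_offsets(file_text)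
--     # Find start line
--     start_line = 0
--     for i, offset in enumerate(line_offsets):
--         if offset > idx:
--             start_line = i
--             break
--     else:
--         start_line = len(line_offsets)
--     # Find end line
--     end_idx = idx + len(chunk_text)
--     end_line = 0
--     for i, offset in enumerate(line_offsets):
--         if offset > end_idx:
--             end_line = i
--             break
--     else:
--         end_line = len(line_offsets)
--     return start_line, end_line
-- ===== SOURCE B (Python) =====
-- def get_chunk_line_numbers(chunk_text, file_text, start_search=0):
--     """Return (start_line, end_line) for chunk_text within file_text."""
--     idx = file_text.find(chunk_text, start_search)
--     if idx == -1:
--         return -1, -1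
--     end_idx = idx + len(chunk_text)
--     return file_text[:idx].count('\n') + 1, file_text[:end_idx].count('\n') + 1
-- ===== Notes on version B (the rewrite author's own statement) =====
-- stated objective: simpler
-- what changed: Dropped get_line_offsets and the two enumerate-scan loops; line numbers are computed directly as 1 + the number of newlines before the match position (resp. before the match end) via prefix-slice .count('\n').
import Mathlib
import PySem

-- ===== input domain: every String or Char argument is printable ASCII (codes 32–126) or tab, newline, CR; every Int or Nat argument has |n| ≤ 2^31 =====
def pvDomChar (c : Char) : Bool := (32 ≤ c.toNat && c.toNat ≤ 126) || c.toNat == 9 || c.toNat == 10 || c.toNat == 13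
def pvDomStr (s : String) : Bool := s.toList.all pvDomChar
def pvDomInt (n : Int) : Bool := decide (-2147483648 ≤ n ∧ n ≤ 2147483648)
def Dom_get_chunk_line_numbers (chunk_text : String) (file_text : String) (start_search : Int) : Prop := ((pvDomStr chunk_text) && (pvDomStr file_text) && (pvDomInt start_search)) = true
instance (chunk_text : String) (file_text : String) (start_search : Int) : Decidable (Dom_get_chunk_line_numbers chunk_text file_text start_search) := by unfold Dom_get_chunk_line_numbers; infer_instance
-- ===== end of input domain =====

-- ===== PORT A =====
-- B replaces A's line-offset table and its two scan loops by counting newlines in a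
-- prefix slice; equivalence of the return values is proved below.

-- helper: get_line_offsets(text)
def pvLineOffsets (text : List Char) : List Int :=
  (PySem.List.enumerate text).foldl
    (fun offsets p => if p.2 == '\n' then offsets ++ [p.1 + 1] else offsets) [0]

-- helper: the 'for i, offset in enumerate(line_offsets): if offset > idx: … break / else: …' loop
-- (returns none when the loop falls through to the else branch)
def pvScanLine : List (Int × Int) → Int → Option Int
  | [], _ => none
  | (i, off) :: rest, idx => if off > idx then some i else pvScanLine rest idx

def get_chunk_line_numbers (chunk_text : String) (file_text : String) (start_search : Int) : Int × Int :=
  let idx := PySem.Str.findFrom file_text chunk_text start_search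
  if idx = -1 then (-1, -1)
  else
    let line_offsets := pvLineOffsets file_text.toList
    let start_line := (pvScanLine (PySem.List.enumerate line_offsets) idx).getD (line_offsets.length : Int)
    let end_idx := idx + PySem.Str.len chunk_text
    let end_line := (pvScanLine (PySem.List.enumerate line_offsets) end_idx).getD (line_offsets.length : Int)
    (start_line, end_line)

-- ===== PORT B =====
def get_chunk_line_numbers_alt (chunk_text : String) (file_text : String) (start_search : Int) : Int × Int :=
  let idx := PySem.Str.findFrom file_text chunk_text start_search
  if idx = -1 then (-1, -1)
  else
    let end_idx := idx + PySem.Str.len chunk_text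
    ((PySem.Str.count (PySem.Str.slice file_text none (some idx)) "\n" : Int) + 1,
     (PySem.Str.count (PySem.Str.slice file_text none (some end_idx)) "\n" : Int) + 1)

-- ===== PRECONDITION & SPEC =====
def Spec_get_chunk_line_numbers (chunk_text : String) (file_text : String) (start_search : Int) (out : Int × Int) : Prop := out = get_chunk_line_numbers_alt chunk_text file_text start_search
instance (chunk_text : String) (file_text : String) (start_search : Int) (out : Int × Int) : Decidable (Spec_get_chunk_line_numbers chunk_text file_text start_search out) := by unfold Spec_get_chunk_line_numbers; infer_instance

-- ===== CLAIM (what is proved, stated in full; the proofs are below) =====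
def Claim_equal_get_chunk_line_numbers : Prop := ∀ (chunk_text : String) (file_text : String) (start_search : Int), Dom_get_chunk_line_numbers chunk_text file_text start_search → Spec_get_chunk_line_numbers chunk_text file_text start_search (get_chunk_line_numbers chunk_text file_text start_search)

-- ===== LEMMAS AND PROOFS =====\n\n-- Chars.count with a single-character needle is plain List.count
lemma countGo_singleton (c : Char) : ∀ (fuel : Nat) (l : List Char) (acc : Nat),
    l.length ≤ fuel → PySem.Chars.count.go [c] fuel l acc = acc + l.count c := by
  intro fuel
  induction fuel with
  | zero => intro l acc h; cases l with
    | nil => simp [PySem.Chars.count.go]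
    | cons x t => simp at h
  | succ f ih => intro l acc h; cases l with
    | nil => simp [PySem.Chars.count.go]
    | cons x t =>
      simp only [PySem.Chars.count.go]
      by_cases hc : c = x
      · subst hc
        simp [List.isPrefixOf, ih t (acc + 1) (by simpa using h)]
        omega
      · simp [List.isPrefixOf, hc, ih t acc (by simpa using h), Ne.symm hc]

lemma chars_count_singleton (l : List Char) (c : Char) :
    PySem.Chars.count l [c] = l.count c := by
  simp [PySem.Chars.count, countGo_singleton c l.length l 0 le_rfl]

-- the for-else scan over an enumerated strictly increasing list counts the elements ≤ m
lemma scan_count (offs : List Int) : ∀ (s m : Int), offs.Pairwise (· < ·) →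
    (pvScanLine (PySem.List.enumerate offs s) m).getD (s + offs.length) =
      s + (offs.countP (fun o => decide (o ≤ m)) : Int) := by
  induction offs with
  | nil => intro s m _; simp [PySem.List.enumerate, pvScanLine]
  | cons o os ih =>
    intro s m hp
    rw [PySem.List.enumerate_cons]
    rcases List.pairwise_cons.mp hp with ⟨ho, hos⟩
    by_cases hom : o > m
    · have hz : os.countP (fun o => decide (o ≤ m)) = 0 :=
        List.countP_eq_zero.mpr (fun x hx => by have := ho x hx; simp; omega)
      simp [pvScanLine, hom, hz]
    · have := ih (s+1) m hos
      simp only [pvScanLine, if_neg hom]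
      rw [List.length_cons, List.countP_cons]
      have harr : s + ((os.length : Int) + 1) = (s+1) + os.length := by ring
      push_cast at this ⊢
      rw [show s + ((os.length : Int) + 1) = (s+1) + (os.length : Int) by ring, this]
      simp [not_lt.mp hom]
      ring

lemma offsets_eq (t : List Char) :
    pvLineOffsets t =
      0 :: ((PySem.List.enumerate t).filter (fun p => p.2 == '\n')).map (fun p => p.1 + 1) := by
  unfold pvLineOffsets
  simpa using PySem.List.foldl_append_if (fun p : Int × Char => p.2 == '\n') (fun p => p.1 + 1) (PySem.List.enumerate t) [0]

lemma offsets_pairwise (t : List Char) : (pvLineOffsets t).Pairwise (· < ·) := by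
  rw [offsets_eq]
  refine List.pairwise_cons.mpr ⟨?_, ?_⟩
  · intro x hx
    rcases List.mem_map.mp hx with ⟨p, hp, rfl⟩
    have hp' := List.mem_of_mem_filter hp
    rcases (PySem.List.mem_enumerate_iff t 0 p).mp hp' with ⟨k, hk, rfl⟩
    simp
  · exact List.Pairwise.map _ (fun a b (h : a.1 < b.1) => by omega)
      ((PySem.List.pairwise_lt_enumerate t 0).filter _)

lemma countP_enumerate_newlines (t : List Char) : ∀ (j m : Nat),
    (PySem.List.enumerate t (j : Int)).countP
        (fun p => (p.2 == '\n') && decide (p.1 + 1 ≤ (m : Int))) =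
      (t.take (m - j)).count '\n' := by
  induction t with
  | nil => intro j m; simp [PySem.List.enumerate]
  | cons c rest ih =>
    intro j m
    rw [PySem.List.enumerate_cons, List.countP_cons]
    have : (j : Int) + 1 = ((j+1 : Nat) : Int) := by push_cast; ring
    rw [this, ih (j+1) m]
    by_cases hjm : j < m
    · have h1 : m - j = (m - (j+1)) + 1 := by omega
      rw [h1, List.take_succ_cons, List.count_cons]
      by_cases hc : c = '\n'
      · simp [hc]
        omega
      · simp [hc]
    · have h1 : m - j = 0 := by omega
      have h2 : m - (j+1) = 0 := by omega
      rw [h1, h2]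
      simp; omega

lemma scan_eq_take_count (t : List Char) (m : Nat) :
    (pvScanLine (PySem.List.enumerate (pvLineOffsets t)) ((m : Nat) : Int)).getD
        ((pvLineOffsets t).length : Int) =
      ((t.take m).count '\n' : Int) + 1 := by
  have h := scan_count (pvLineOffsets t) 0 (m : Int) (offsets_pairwise t)
  rw [zero_add] at h
  rw [show PySem.List.enumerate (pvLineOffsets t) = PySem.List.enumerate (pvLineOffsets t) 0 from rfl, h, zero_add]
  rw [offsets_eq, List.countP_cons]
  rw [List.countP_map, List.countP_filter]
  have h2 : ((PySem.List.enumerate t).countP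
        (fun p => (decide (p.1 + 1 ≤ (m:Int))) && (p.2 == '\n'))) = (t.take m).count '\n' := by
    have := countP_enumerate_newlines t 0 m
    simp only [Nat.cast_zero, Nat.sub_zero] at this
    rw [← this]
    congr 1
    funext p
    exact Bool.and_comm _ _
  simp only [Function.comp] at *
  rw [show ((PySem.List.enumerate t).countP
        (fun p => decide (p.1 + 1 ≤ (m:Int)) && (p.2 == '\n'))) = (t.take m).count '\n' from h2]
  simp

lemma findFrom_nonneg (s sub : List Char) (st : Int)
    (h : PySem.Chars.findFrom s sub st none ≠ -1) : 0 ≤ PySem.Chars.findFrom s sub st none := by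
  simp only [PySem.Chars.findFrom] at h ⊢
  set st' := if st < 0 then if st + (s.length:Int) < 0 then 0 else st + (s.length:Int) else st with hst'
  have hst : 0 ≤ st' := by rw [hst']; split_ifs <;> omega
  have hf := PySem.Chars.neg_one_le_find (List.drop st'.toNat (List.take ((s.length:Int)).toNat s)) sub
  split_ifs at h ⊢ <;> omega

-- ===== VERDICT (by name: the statement is the Claim_ definition above) =====
theorem get_chunk_line_numbers_spec : Claim_equal_get_chunk_line_numbers := by
  intro chunk_text file_text start_search _
  unfold Spec_get_chunk_line_numbers get_chunk_line_numbers get_chunk_line_numbers_alt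
  by_cases hidx : PySem.Str.findFrom file_text chunk_text start_search = -1
  · rw [PySem.Str.findFrom_eq] at hidx
    simp [hidx]
  · have h0 : 0 ≤ PySem.Str.findFrom file_text chunk_text start_search := by
      rw [PySem.Str.findFrom_eq] at hidx ⊢
      exact findFrom_nonneg _ _ _ hidx
    simp only [if_neg hidx]
    set idx := PySem.Str.findFrom file_text chunk_text start_search with hidx_def
    have hm : ((idx.toNat : Nat) : Int) = idx := Int.toNat_of_nonneg h0
    have hend : idx + PySem.Str.len chunk_text = ((idx.toNat + chunk_text.toList.length : Nat) : Int) := by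
      simp [PySem.Str.len]; omega
    have hslice : ∀ (k : Nat), (PySem.Str.count (PySem.Str.slice file_text none (some ((k:Nat):Int))) "\n" : Int)
        = ((file_text.toList.take k).count '\n' : Int) := by
      intro k
      rw [PySem.Str.count_eq, PySem.Str.toList_slice]
      rw [show PySem.Chars.slice file_text.toList none (some ((k:Nat):Int)) = PySem.List.slice file_text.toList none (some ((k:Nat):Int)) from rfl]
      rw [PySem.List.slice_to_natCast]
      rw [show ("\n" : String).toList = ['\n'] from rfl]
      rw [chars_count_singleton]
    simp only [Prod.mk.injEq]
    refine ⟨?_, ?_⟩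
    · rw [← hm]
      exact (scan_eq_take_count file_text.toList idx.toNat).trans (by rw [hslice])
    · rw [hend]
      exact (scan_eq_take_count file_text.toList _).trans (by rw [hslice])
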